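-- pv_equiv track=rewrite | github.com/rihla-team/Qirtas | utils/rtl_handler.py | handle_mixed_text
-- ===== SOURCE A (Python) =====
-- def handle_mixed_text(text):
--     # التعامل مع النصوص المختلطة (عربي، لاتيني، أرقام)
--     parts = []
--     current_part = ''
--     current_direction = None
--
--     for char in text:
--         if char.isalpha():
--             direction = 'rtl' if '\u0600' <= char <= '\u06FF' else 'ltr'
--         else:
--             direction = current_direction or 'neutral'
--
--         if direction != current_direction and current_part:
--             parts.append((current_part, current_direction))
--             current_part = ''
--
--         current_part += char
--         current_direction = direction
--
--     if current_part:
--         parts.append((current_part, current_direction))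
--
--     return parts
-- ===== SOURCE B (Python) =====
-- def handle_mixed_text(text):
--     # Pass 1: direction table, one entry per character, threading the previous direction.
--     dirs = []
--     prev = None
--     for char in text:
--         if char.isalpha():
--             d = 'rtl' if '\u0600' <= char <= '\u06FF' else 'ltr'
--         else:
--             d = prev or 'neutral'
--         dirs.append(d)
--         prev = d
--     # Pass 2: cut maximal runs of equal direction out of the table with slices.
--     parts = []
--     i, n = 0, len(text)
--     while i < n:
--         j = i + 1
--         while j < n and dirs[j] == dirs[i]:
--             j += 1
--         parts.append((text[i:j], dirs[i]))
--         i = j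
--     return parts
-- ===== Notes on version B (the rewrite author's own statement) =====
-- stated objective: alternative
-- what changed: A's single flush-on-direction-change accumulator loop is replaced by two passes: first a per-character direction table threading the previous direction, then slicing maximal runs of equal direction out of the text with an index scan.
import Mathlib
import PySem

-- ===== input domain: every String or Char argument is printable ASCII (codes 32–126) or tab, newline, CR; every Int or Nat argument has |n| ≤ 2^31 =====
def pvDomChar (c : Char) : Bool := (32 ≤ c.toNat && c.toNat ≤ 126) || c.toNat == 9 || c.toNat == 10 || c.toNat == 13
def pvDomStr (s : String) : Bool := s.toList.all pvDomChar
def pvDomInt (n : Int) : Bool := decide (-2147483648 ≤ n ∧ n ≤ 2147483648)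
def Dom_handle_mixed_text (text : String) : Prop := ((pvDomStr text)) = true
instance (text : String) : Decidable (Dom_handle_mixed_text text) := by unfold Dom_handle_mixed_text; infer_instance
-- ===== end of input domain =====

-- B replaces A's single flush-on-change accumulator loop by two passes — a per-character
-- direction table, then slicing maximal equal-direction runs out of it (objective: alternative).

-- ===== PORT A =====
-- direction of one character given the current direction (A's first if/else)
def pvDirA (c : Char) (cd : Option String) : String :=
  if PySem.Chars.isalpha c then (if '\u0600' ≤ c ∧ c ≤ '\u06FF' then "rtl" else "ltr")
  else cd.getD "neutral"    -- `current_direction or 'neutral'` (cd is never some "")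

-- A's for-loop; current_part kept as List Char, turned into a String when appended
def pvLoopA : List Char → List (String × String) → List Char → Option String → List (String × String)
  | [], parts, cur, cd =>
      if cur ≠ [] then parts ++ [(String.ofList cur, cd.getD "")] else parts
  | c :: cs, parts, cur, cd =>
      let d := pvDirA c cd
      if some d ≠ cd ∧ cur ≠ [] then
        pvLoopA cs (parts ++ [(String.ofList cur, cd.getD "")]) [c] (some d)
      else
        pvLoopA cs parts (cur ++ [c]) (some d)

def handle_mixed_text (text : String) : List (String × String) :=
  pvLoopA text.toList [] [] none

-- ===== PORT B =====
-- pass 1: the direction table (same per-character rule, threaded previous direction)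
def pvDirB (c : Char) (prev : Option String) : String :=
  if PySem.Chars.isalpha c then (if '\u0600' ≤ c ∧ c ≤ '\u06FF' then "rtl" else "ltr")
  else prev.getD "neutral"

def pvDirs : List Char → Option String → List String
  | [], _ => []
  | c :: cs, prev => let d := pvDirB c prev; d :: pvDirs cs (some d)

-- pass 2: cut maximal runs of equal direction from the front (the while loops / slices)
def pvRuns : List (Char × String) → List (List Char × String)
  | [] => []
  | (c, d) :: rest =>
      (c :: (rest.takeWhile (fun p => p.2 == d)).map Prod.fst, d)
        :: pvRuns (rest.dropWhile (fun p => p.2 == d))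
  termination_by l => l.length
  decreasing_by
    simpa using Nat.lt_succ_of_le (List.length_dropWhile_le _ _)

def handle_mixed_text_alt (text : String) : List (String × String) :=
  (pvRuns (text.toList.zip (pvDirs text.toList none))).map (fun p => (String.ofList p.1, p.2))

-- ===== PRECONDITION & SPEC =====
def Spec_handle_mixed_text (text : String) (out : List (String × String)) : Prop := out = handle_mixed_text_alt text
instance (text : String) (out : List (String × String)) : Decidable (Spec_handle_mixed_text text out) := by unfold Spec_handle_mixed_text; infer_instance

-- ===== CLAIM (what is proved, stated in full; the proofs are below) =====
def Claim_equal_handle_mixed_text : Prop := ∀ (text : String), Dom_handle_mixed_text text → Spec_handle_mixed_text text (handle_mixed_text text)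

-- ===== LEMMAS AND PROOFS =====

-- prepend `cur` to the first run if it has direction `d`, else emit (cur, d) as its own run
def pvMerge (cur : List Char) (d : String) : List (List Char × String) → List (List Char × String)
  | [] => [(cur, d)]
  | (t, d') :: rest => if d' = d then (cur ++ t, d) :: rest else (cur, d) :: (t, d') :: rest

theorem pvRuns_cons (c : Char) (d : String) (l : List (Char × String)) :
    pvRuns ((c, d) :: l) = pvMerge [c] d (pvRuns l) := by
  match l with
  | [] => simp [pvRuns, pvMerge]
  | (c', d') :: l' =>
    by_cases h : d' = d
    · subst h
      rw [pvRuns, pvRuns]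
      simp [pvMerge, List.takeWhile, List.dropWhile]
    · rw [pvRuns]
      simp only [List.takeWhile_cons, List.dropWhile_cons, beq_iff_eq, h,
        if_false, List.map_nil]
      rw [pvRuns]
      simp [pvMerge, h]

theorem pvMerge_merge (cur : List Char) (c : Char) (d : String)
    (gs : List (List Char × String)) :
    pvMerge cur d (pvMerge [c] d gs) = pvMerge (cur ++ [c]) d gs := by
  match gs with
  | [] => simp [pvMerge]
  | (t, d') :: rest =>
    by_cases h : d' = d <;> simp [pvMerge, h]

theorem pvMerge_ne (cur : List Char) (c : Char) (d d' : String) (hd : d' ≠ d)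
    (gs : List (List Char × String)) :
    pvMerge cur d (pvMerge [c] d' gs) = (cur, d) :: pvMerge [c] d' gs := by
  match gs with
  | [] => simp [pvMerge, hd]
  | (t, d'') :: rest =>
    by_cases h : d'' = d' <;> simp [pvMerge, h, hd]

theorem pvDirB_eq_pvDirA (c : Char) (p : Option String) : pvDirB c p = pvDirA c p := rfl

theorem pvLoopA_eq (cs : List Char) : ∀ (parts : List (String × String))
    (cur : List Char) (d : String), cur ≠ [] →
    pvLoopA cs parts cur (some d)
      = parts ++ (pvMerge cur d (pvRuns (cs.zip (pvDirs cs (some d))))).map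
          (fun p => (String.ofList p.1, p.2)) := by
  induction cs with
  | nil =>
    intro parts cur d hcur
    simp [pvLoopA, hcur, pvDirs, pvRuns, pvMerge]
  | cons c cs ih =>
    intro parts cur d hcur
    rw [pvLoopA]
    by_cases h : pvDirA c (some d) = d
    · have hcond : ¬ (some (pvDirA c (some d)) ≠ some d ∧ cur ≠ []) := by simp [h]
      rw [if_neg hcond, h]
      rw [ih parts (cur ++ [c]) d (by simp)]
      rw [pvDirs, pvDirB_eq_pvDirA, h]
      simp only [List.zip_cons_cons, pvRuns_cons, pvMerge_merge]
    · have hcond : (some (pvDirA c (some d)) ≠ some d ∧ cur ≠ []) := by simp [h, hcur]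
      rw [if_pos hcond]
      simp only [Option.getD_some]
      rw [ih (parts ++ [(String.ofList cur, d)]) [c] (pvDirA c (some d)) (by simp)]
      rw [pvDirs, pvDirB_eq_pvDirA]
      simp only [List.zip_cons_cons, pvRuns_cons, pvMerge_ne _ _ _ _ h, List.map_cons,
        List.append_assoc, List.cons_append, List.nil_append]

-- ===== VERDICT (by name: the statement is the Claim_ definition above) =====
theorem handle_mixed_text_spec : Claim_equal_handle_mixed_text := by
  intro text _
  unfold Spec_handle_mixed_text handle_mixed_text handle_mixed_text_alt
  match h : text.toList with
  | [] => simp [pvLoopA, pvDirs, pvRuns]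
  | c :: cs =>
    rw [pvLoopA]
    rw [if_neg (by simp)]
    rw [pvLoopA_eq cs [] ([] ++ [c]) (pvDirA c none) (by simp)]
    rw [pvDirs, pvDirB_eq_pvDirA]
    simp [pvRuns_cons]
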